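-- pv_equiv track=rewrite | github.com/raggesilver/infnet | programming_club/algorithms/24.4T/24_3_list_2/5018.py | is_possible_to_adopt_same_set_of_animals
-- ===== SOURCE A (Python) =====
-- def is_possible_to_adopt_same_set_of_animals(count: int, animals: list[str]) -> bool:
--     if count % 2 != 0:
--         return False
--
--     animals_dict = {}
--
--     for animal in animals:
--         if animal in animals_dict:
--             animals_dict[animal] += 1
--         else:
--             animals_dict[animal] = 1
--
--     for key in animals_dict:
--         if animals_dict[key] % 2 != 0:
--             return False
--
--     return True
-- ===== SOURCE B (Python) =====
-- def is_possible_to_adopt_same_set_of_animals(count: int, animals: list[str]) -> bool: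
--     if count % 2 != 0:
--         return False
--
--     odd = set()
--     for animal in animals:
--         if animal in odd:
--             odd.discard(animal)
--         else:
--             odd.add(animal)
--
--     return len(odd) == 0
-- ===== Notes on version B (the rewrite author's own statement) =====
-- stated objective: simpler
-- what changed: Replaces the two-pass build-a-frequency-dict-then-scan-it with a single pass that parity-toggles each animal in a set and checks the set is empty at the end.
import Mathlib
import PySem

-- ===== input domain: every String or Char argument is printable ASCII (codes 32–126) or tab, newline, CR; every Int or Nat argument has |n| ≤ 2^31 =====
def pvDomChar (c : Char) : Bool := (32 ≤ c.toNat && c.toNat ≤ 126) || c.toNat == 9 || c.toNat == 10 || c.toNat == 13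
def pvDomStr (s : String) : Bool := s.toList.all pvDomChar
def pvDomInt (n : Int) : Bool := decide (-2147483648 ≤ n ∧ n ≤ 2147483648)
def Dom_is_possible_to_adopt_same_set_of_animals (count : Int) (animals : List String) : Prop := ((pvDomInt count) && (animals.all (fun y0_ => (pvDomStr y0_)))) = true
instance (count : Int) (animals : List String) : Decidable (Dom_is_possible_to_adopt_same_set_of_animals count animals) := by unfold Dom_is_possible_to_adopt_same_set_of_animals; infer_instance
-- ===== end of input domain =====

-- B replaces A's two passes (build a frequency dict, then scan it for an odd count) by a
-- single parity-toggle pass over a set; same results, no speed claim.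

-- ===== PORT A =====
def is_possible_to_adopt_same_set_of_animals (count : Int) (animals : List String) : Bool :=
  if PySem.Int.mod count 2 ≠ 0 then false
  else
    let d : PySem.Dict String Int :=
      animals.foldl (fun d animal =>
        if d.contains animal then d.modify animal 0 (· + 1)
        else d.insert animal 1) PySem.Dict.empty
    -- 'for key in animals_dict: if odd count: return False' then 'return True'
    d.keys.all (fun k => !(PySem.Int.mod (d.getD k 0) 2 ≠ 0))

-- ===== PORT B =====
def is_possible_to_adopt_same_set_of_animals_alt (count : Int) (animals : List String) : Bool :=
  if PySem.Int.mod count 2 ≠ 0 then false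
  else
    let odd : PySem.Set String :=
      animals.foldl (fun s animal =>
        if PySem.Set.contains s animal then PySem.Set.discard s animal
        else PySem.Set.add s animal) PySem.Set.empty
    PySem.Set.len odd == 0

-- ===== PRECONDITION & SPEC =====
def Spec_is_possible_to_adopt_same_set_of_animals (count : Int) (animals : List String) (out : Bool) : Prop := out = is_possible_to_adopt_same_set_of_animals_alt count animals
instance (count : Int) (animals : List String) (out : Bool) : Decidable (Spec_is_possible_to_adopt_same_set_of_animals count animals out) := by unfold Spec_is_possible_to_adopt_same_set_of_animals; infer_instance

-- ===== CLAIM (what is proved, stated in full; the proofs are below) =====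
def Claim_equal_is_possible_to_adopt_same_set_of_animals : Prop := ∀ (count : Int) (animals : List String), Dom_is_possible_to_adopt_same_set_of_animals count animals → Spec_is_possible_to_adopt_same_set_of_animals count animals (is_possible_to_adopt_same_set_of_animals count animals)

-- ===== LEMMAS AND PROOFS =====

-- A's counting loop is Counter(animals): the 'else insert 1' branch is exactly what modify does on a missing key.
theorem aFold_eq_counter (animals : List String) :
    animals.foldl (fun (d : PySem.Dict String Int) animal =>
        if d.contains animal then d.modify animal 0 (· + 1)
        else d.insert animal 1) PySem.Dict.empty = PySem.Dict.counter animals := by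
  have hstep : (fun (d : PySem.Dict String Int) animal =>
      if d.contains animal then d.modify animal 0 (· + 1)
      else d.insert animal 1) = fun (d : PySem.Dict String Int) animal => d.modify animal 0 (· + 1) := by
    funext d x
    by_cases h : d.contains x = true
    · simp [h]
    · simp only [Bool.not_eq_true] at h
      have hg : d.getD x 0 = 0 := PySem.Dict.getD_of_not_contains d 0 h
      simp [PySem.Dict.modify, PySem.Dict.insert, h, hg]
  rw [hstep, PySem.Dict.counter_eq_foldl]

-- B's toggle loop: an element is in the folded set iff its membership in the start set
-- disagrees with the evenness of its count in the list (and the set stays duplicate-free).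
theorem toggle_invariant (xs : List String) : ∀ (s : PySem.Set String), s.Nodup →
    (xs.foldl (fun (s : PySem.Set String) animal =>
        if PySem.Set.contains s animal then PySem.Set.discard s animal
        else PySem.Set.add s animal) s).Nodup ∧
    ∀ x, (x ∈ xs.foldl (fun (s : PySem.Set String) animal =>
        if PySem.Set.contains s animal then PySem.Set.discard s animal
        else PySem.Set.add s animal) s ↔ (x ∈ s ↔ xs.count x % 2 = 0)) := by
  induction xs with
  | nil => intro s hs; exact ⟨hs, fun x => by simp⟩
  | cons a xs ih =>
    intro s hs
    have hstep : ((if PySem.Set.contains s a then PySem.Set.discard s a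
        else PySem.Set.add s a) : PySem.Set String).Nodup := by
      by_cases h : PySem.Set.contains s a = true
      · rw [if_pos h]; exact PySem.Set.nodup_discard s a hs
      · rw [if_neg h]; exact PySem.Set.nodup_add s a hs
    obtain ⟨hnd, hmem⟩ := ih _ hstep
    constructor
    · rw [List.foldl_cons]; exact hnd
    · intro x
      rw [List.foldl_cons, hmem x]
      have hca : PySem.Set.contains s a = true ↔ a ∈ s := by
        simp [PySem.Set.contains_eq_listContains]
      by_cases hmemA : a ∈ s
      · rw [if_pos (hca.mpr hmemA), PySem.Set.mem_discard]
        by_cases hxa : x = a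
        · subst hxa
          simp only [List.count_cons, BEq.rfl, if_pos]
          simp [hmemA]
          omega
        · simp [hxa, Ne.symm hxa]
      · rw [if_neg (fun hc => hmemA (hca.mp hc)), PySem.Set.mem_add]
        by_cases hxa : x = a
        · subst hxa
          simp only [List.count_cons, BEq.rfl, if_pos]
          simp [hmemA]
          omega
        · simp [hxa, Ne.symm hxa]

-- ===== VERDICT (by name: the statement is the Claim_ definition above) =====
theorem is_possible_to_adopt_same_set_of_animals_spec : Claim_equal_is_possible_to_adopt_same_set_of_animals := by
  intro count animals _
  unfold Spec_is_possible_to_adopt_same_set_of_animals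
  unfold is_possible_to_adopt_same_set_of_animals is_possible_to_adopt_same_set_of_animals_alt
  by_cases hc : PySem.Int.mod count 2 ≠ 0
  · rw [if_pos hc, if_pos hc]
  · rw [if_neg hc, if_neg hc]
    rw [aFold_eq_counter]
    obtain ⟨_, hmem⟩ := toggle_invariant animals PySem.Set.empty List.nodup_nil
    have hnil : (animals.foldl (fun (s : PySem.Set String) animal =>
        if PySem.Set.contains s animal then PySem.Set.discard s animal
        else PySem.Set.add s animal) PySem.Set.empty = []) ↔
        ∀ x ∈ animals, animals.count x % 2 = 0 := by
      constructor
      · intro h x hx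
        by_contra hodd
        have hxm : x ∈ animals.foldl (fun (s : PySem.Set String) animal =>
            if PySem.Set.contains s animal then PySem.Set.discard s animal
            else PySem.Set.add s animal) PySem.Set.empty :=
          (hmem x).mpr (iff_of_false (by simp [PySem.Set.empty]) hodd)
        rw [h] at hxm
        exact absurd hxm List.not_mem_nil
      · intro h
        rw [List.eq_nil_iff_forall_not_mem]
        intro x hx
        rw [hmem x] at hx
        have hc2 : animals.count x % 2 = 0 := by
          by_cases hxin : x ∈ animals
          · exact h x hxin
          · have hz : animals.count x = 0 := List.count_eq_zero.mpr hxin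
            omega
        have : x ∈ (PySem.Set.empty : PySem.Set String) := hx.mpr hc2
        simp [PySem.Set.empty] at this
    have hempty : (PySem.Set.len (animals.foldl (fun (s : PySem.Set String) animal =>
        if PySem.Set.contains s animal then PySem.Set.discard s animal
        else PySem.Set.add s animal) PySem.Set.empty) == 0) = true ↔
        ∀ x ∈ animals, animals.count x % 2 = 0 := by
      rw [← hnil]
      simp [PySem.Set.len, List.length_eq_zero_iff]
    have hall : (PySem.Dict.counter animals).keys.all
        (fun k => !(PySem.Int.mod ((PySem.Dict.counter animals).getD k 0) 2 ≠ 0)) = true ↔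
        ∀ x ∈ animals, animals.count x % 2 = 0 := by
      rw [List.all_eq_true]
      constructor
      · intro h x hx
        have hk : x ∈ (PySem.Dict.counter animals).keys := by
          rw [PySem.Dict.keys_counter]; exact (PySem.Set.mem_ofList _ _).mpr hx
        have hh := h x hk
        simp [PySem.Dict.getD_counter] at hh
        omega
      · intro h x hx
        rw [PySem.Dict.keys_counter] at hx
        have hxa : x ∈ animals := (PySem.Set.mem_ofList _ _).mp hx
        have hh := h x hxa
        simp [PySem.Dict.getD_counter]
        omega
    rw [Bool.eq_iff_iff, hall, hempty]
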